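-- pv_equiv track=rewrite | github.com/anniphung/KdP_Aufgaben | RekursionUndSchleifenAbgabe.py | lovedDigits_W
-- ===== SOURCE A (Python) =====
-- def lovedDigits_W(n):
--     erg = 0
--     place = 1
--
--     while n > 0:
--         lastDigit = n % 10
--         if lastDigit == 0:
--             lovedDigit = 0
--         else:
--             lovedDigit = 10 - lastDigit
--         erg = erg + (lovedDigit * place)
--         place *= 10
--         n //= 10
--     return erg
-- ===== SOURCE B (Python) =====
-- def lovedDigits_W(n):
--     if n <= 0:
--         return 0
--     digits = []
--     while n > 0:
--         digits.append(n % 10)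
--         n //= 10
--     erg = 0
--     for d in reversed(digits):
--         erg = erg * 10 + (10 - d if d != 0 else 0)
--     return erg
-- ===== Notes on version B (the rewrite author's own statement) =====
-- stated objective: alternative
-- what changed: Replaces the single right-to-left pass that accumulates loved digits with positional weights (place) by a two-phase algorithm: first collect the digit list via divmod, then rebuild the result most-significant-first with a Horner-style fold (erg = erg*10 + loved), eliminating the place variable.
import Mathlib
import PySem

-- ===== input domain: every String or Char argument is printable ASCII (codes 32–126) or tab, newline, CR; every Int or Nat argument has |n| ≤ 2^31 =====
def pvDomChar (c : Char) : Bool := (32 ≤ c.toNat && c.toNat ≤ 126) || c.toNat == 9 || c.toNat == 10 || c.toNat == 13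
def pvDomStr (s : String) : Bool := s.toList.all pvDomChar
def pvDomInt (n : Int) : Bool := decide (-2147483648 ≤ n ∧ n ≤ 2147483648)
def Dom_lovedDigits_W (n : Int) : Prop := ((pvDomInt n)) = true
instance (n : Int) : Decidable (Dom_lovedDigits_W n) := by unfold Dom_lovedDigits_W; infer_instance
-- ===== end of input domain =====

-- B collects the digit list first and rebuilds the result by a Horner fold (no `place` weights); equivalence is about the return value only.

-- termination helper cited by both ports
theorem pvFloordivTenLt (n : Int) (h : 0 < n) :
    (PySem.Int.floordiv n 10).toNat < n.toNat := by
  have h10 : (0:Int) < 10 := by norm_num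
  have := PySem.Int.floordiv_lt_iff_lt_mul (a := n) (b := 10) (q := n) h10
  have hub : PySem.Int.floordiv n 10 < n := this.mpr (by nlinarith)
  have hlb : 0 ≤ PySem.Int.floordiv n 10 :=
    (PySem.Int.le_floordiv_iff_mul_le (a := n) (b := 10) (q := 0) h10).mpr (by omega)
  omega

-- ===== PORT A =====
def lovedDigits_W_loop (erg place n : Int) : Int :=
  if h : n > 0 then
    let lastDigit := PySem.Int.mod n 10
    let lovedDigit := if lastDigit = 0 then 0 else 10 - lastDigit
    lovedDigits_W_loop (erg + lovedDigit * place) (place * 10) (PySem.Int.floordiv n 10)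
  else erg
termination_by n.toNat
decreasing_by exact pvFloordivTenLt n h

def lovedDigits_W (n : Int) : Int := lovedDigits_W_loop 0 1 n

-- ===== PORT B =====
-- phase 1: while n > 0: digits.append(n % 10); n //= 10
def lovedDigits_W_alt_digits (digits : List Int) (n : Int) : List Int :=
  if h : n > 0 then
    lovedDigits_W_alt_digits (digits ++ [PySem.Int.mod n 10]) (PySem.Int.floordiv n 10)
  else digits
termination_by n.toNat
decreasing_by exact pvFloordivTenLt n h

-- phase 2: for d in reversed(digits): erg = erg*10 + (10-d if d != 0 else 0)
def lovedDigits_W_alt (n : Int) : Int :=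
  if n ≤ 0 then 0
  else
    (lovedDigits_W_alt_digits [] n).reverse.foldl
      (fun erg d => erg * 10 + (if d ≠ 0 then 10 - d else 0)) 0

-- ===== PRECONDITION & SPEC =====
def Spec_lovedDigits_W (n : Int) (out : Int) : Prop := out = lovedDigits_W_alt n
instance (n : Int) (out : Int) : Decidable (Spec_lovedDigits_W n out) := by unfold Spec_lovedDigits_W; infer_instance

-- ===== CLAIM (what is proved, stated in full; the proofs are below) =====
def Claim_equal_lovedDigits_W : Prop := ∀ (n : Int), Dom_lovedDigits_W n → Spec_lovedDigits_W n (lovedDigits_W n)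

-- ===== LEMMAS AND PROOFS =====

-- B's Horner value of n's digit list, as one function of n (proof helper)
def pvBcore (n : Int) : Int :=
  (lovedDigits_W_alt_digits [] n).reverse.foldl
    (fun erg d => erg * 10 + (if d ≠ 0 then 10 - d else 0)) 0

theorem pvDigits_acc (n : Int) (acc : List Int) :
    lovedDigits_W_alt_digits acc n = acc ++ lovedDigits_W_alt_digits [] n := by
  by_cases h : n > 0
  · conv_lhs => rw [lovedDigits_W_alt_digits]
    conv_rhs => rw [lovedDigits_W_alt_digits]
    simp only [h, dif_pos]
    rw [pvDigits_acc (PySem.Int.floordiv n 10) (acc ++ [PySem.Int.mod n 10]),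
        List.nil_append,
        pvDigits_acc (PySem.Int.floordiv n 10) ([PySem.Int.mod n 10])]
    simp
  · conv_lhs => rw [lovedDigits_W_alt_digits]
    conv_rhs => rw [lovedDigits_W_alt_digits]
    simp [h]
termination_by n.toNat
decreasing_by all_goals exact pvFloordivTenLt n h

theorem pvBcore_pos (n : Int) (h : n > 0) :
    pvBcore n = 10 * pvBcore (PySem.Int.floordiv n 10)
      + (if PySem.Int.mod n 10 ≠ 0 then 10 - PySem.Int.mod n 10 else 0) := by
  unfold pvBcore
  rw [lovedDigits_W_alt_digits]
  simp only [h, dif_pos, List.nil_append]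
  rw [pvDigits_acc (PySem.Int.floordiv n 10) ([PySem.Int.mod n 10])]
  rw [List.reverse_append]
  simp [List.foldl_append]
  ring

theorem pvAloop_eq (n erg place : Int) :
    lovedDigits_W_loop erg place n = erg + place * pvBcore n := by
  by_cases h : n > 0
  · rw [lovedDigits_W_loop]
    simp only [h, dif_pos]
    rw [pvAloop_eq (PySem.Int.floordiv n 10)]
    rw [pvBcore_pos n h]
    split_ifs with hd hd2
    · exact absurd hd hd2
    · ring
    · ring
  · rw [lovedDigits_W_loop]
    simp only [h, dif_neg, not_false_iff]
    have : pvBcore n = 0 := by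
      unfold pvBcore
      rw [lovedDigits_W_alt_digits]
      simp [h]
    rw [this]; ring
termination_by n.toNat
decreasing_by exact pvFloordivTenLt n h

-- ===== VERDICT (by name: the statement is the Claim_ definition above) =====
theorem lovedDigits_W_spec : Claim_equal_lovedDigits_W := by
  intro n _
  unfold Spec_lovedDigits_W lovedDigits_W lovedDigits_W_alt
  rw [pvAloop_eq]
  by_cases h : n ≤ 0
  · have : pvBcore n = 0 := by
      unfold pvBcore
      rw [lovedDigits_W_alt_digits]
      simp [show ¬ n > 0 by omega]
    simp [h, this]
  · simp only [h, if_neg, not_false_iff]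
    unfold pvBcore
    ring
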